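-- pv_equiv track=rewrite | github.com/egisxxegis/pirmasBioItLaboras | sequence_tools.py | find_start_ends
-- ===== SOURCE A (Python) =====
-- def find_start_ends(translated_seq_obj):
--     # we get Seq(Q*MQMM*M**Q)
--     # we return [(2,6), (4,6), (5,6), (7,8)] - pairs of M and * pos
--     the_start_ends = []
--     the_starts = []
--     the_ends = []
--     if len(translated_seq_obj) < 1:
--         return the_start_ends
--
--     # find all starts ant ends
--     for position in range(len(translated_seq_obj)):
--         if translated_seq_obj[position] == 'M':
--             the_starts.append(position)
--         elif translated_seq_obj[position] == '*':
--             the_ends.append(position)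
--     if len(the_starts) < 1 or len(the_ends) < 1:
--         return the_start_ends
--
--     # make pairs
--     the_index_to_check_start = 0
--     the_index_to_check_end = 0
--     while True:
--         start = the_starts[the_index_to_check_start]
--         end = the_ends[the_index_to_check_end]
--         if end < start:
--             # take another end
--             the_index_to_check_end += 1
--             if the_index_to_check_end >= len(the_ends):
--                 break
--             continue
--
--         the_start_ends.append((start, end))
--         the_index_to_check_start += 1
--         if the_index_to_check_start >= len(the_starts):
--             break
--         continue
--
--     return the_start_ends
-- ===== SOURCE B (Python) =====
-- def find_start_ends(translated_seq_obj):
--     n = len(translated_seq_obj)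
--     next_star = [None] * n
--     nxt = None
--     for i in range(n - 1, -1, -1):
--         if translated_seq_obj[i] == '*':
--             nxt = i
--         next_star[i] = nxt
--     return [(p, next_star[p]) for p in range(n)
--             if translated_seq_obj[p] == 'M' and next_star[p] is not None]
-- ===== Notes on version B (the rewrite author's own statement) =====
-- stated objective: alternative
-- what changed: Replaces A's collect-two-lists-then-two-pointer-merge with a single right-to-left suffix scan computing the nearest '*' at or after each position, followed by one comprehension pairing each 'M' with it.
import Mathlib
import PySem

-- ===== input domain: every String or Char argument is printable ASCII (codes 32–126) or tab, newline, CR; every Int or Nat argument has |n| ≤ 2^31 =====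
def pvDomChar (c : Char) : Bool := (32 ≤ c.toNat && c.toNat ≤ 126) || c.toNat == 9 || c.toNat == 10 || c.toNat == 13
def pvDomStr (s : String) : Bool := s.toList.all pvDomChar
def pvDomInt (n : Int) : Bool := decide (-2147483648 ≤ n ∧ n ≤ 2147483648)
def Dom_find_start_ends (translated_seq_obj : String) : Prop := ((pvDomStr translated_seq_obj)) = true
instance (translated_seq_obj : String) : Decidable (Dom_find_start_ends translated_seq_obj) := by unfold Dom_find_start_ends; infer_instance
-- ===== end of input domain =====

-- B replaces A's gather-two-lists-then-two-pointer-merge with a right-to-left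
-- nearest-next-'*' suffix scan and one pairing pass (alternative structure, same cost).

-- ===== PORT A =====
-- A's first loop: walk positions left to right, collecting 'M' positions and '*' positions.
def pvScanSE : List Char → Int → List Int × List Int
  | [], _ => ([], [])
  | c :: cs, i =>
    let rest := pvScanSE cs (i + 1)
    if c = 'M' then (i :: rest.1, rest.2)
    else if c = '*' then (rest.1, i :: rest.2)
    else rest

-- A's while-True two-pointer merge: advance the end pointer while end < start, else emit.
def pvPairLoop : List Int → List Int → List (Int × Int)
  | _, [] => []
  | [], _ => []
  | s :: ss, e :: es =>
    if e < s then pvPairLoop (s :: ss) es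
    else (s, e) :: pvPairLoop ss (e :: es)
  termination_by a b => a.length + b.length

def find_start_ends (translated_seq_obj : String) : List (Int × Int) :=
  let cs := translated_seq_obj.toList
  if cs.length < 1 then []
  else
    let se := pvScanSE cs 0
    if se.1.length < 1 ∨ se.2.length < 1 then []
    else pvPairLoop se.1 se.2

-- ===== PORT B =====
-- B's right-to-left fill: next_star[i] = i if cs[i]='*', else next_star[i+1] (none past end).
def pvNextStar : List Char → Int → List (Option Int)
  | [], _ => []
  | c :: cs, i =>
    let tail := pvNextStar cs (i + 1)
    (if c = '*' then some i else match tail with | [] => none | h :: _ => h) :: tail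

-- B's comprehension: emit (p, next_star[p]) at every 'M' with a star after it.
def pvCollect : List Char → List (Option Int) → Int → List (Int × Int)
  | c :: cs, o :: os, i =>
    if c = 'M' then
      match o with
      | some j => (i, j) :: pvCollect cs os (i + 1)
      | none => pvCollect cs os (i + 1)
    else pvCollect cs os (i + 1)
  | _, _, _ => []

def find_start_ends_alt (translated_seq_obj : String) : List (Int × Int) :=
  let cs := translated_seq_obj.toList
  pvCollect cs (pvNextStar cs 0) 0

-- ===== PRECONDITION & SPEC =====
def Spec_find_start_ends (translated_seq_obj : String) (out : List (Int × Int)) : Prop := out = find_start_ends_alt translated_seq_obj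
instance (translated_seq_obj : String) (out : List (Int × Int)) : Decidable (Spec_find_start_ends translated_seq_obj out) := by unfold Spec_find_start_ends; infer_instance

-- ===== CLAIM (what is proved, stated in full; the proofs are below) =====
def Claim_equal_find_start_ends : Prop := ∀ (translated_seq_obj : String), Dom_find_start_ends translated_seq_obj → Spec_find_start_ends translated_seq_obj (find_start_ends translated_seq_obj)

-- ===== LEMMAS AND PROOFS =====

theorem pvPairLoop_nil_right (ss : List Int) : pvPairLoop ss [] = [] := by
  cases ss <;> simp [pvPairLoop]

theorem pvPairLoop_nil_left (es : List Int) : pvPairLoop [] es = [] := by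
  cases es <;> simp [pvPairLoop]

theorem pvPairLoop_cons (s e : Int) (ss es : List Int) :
    pvPairLoop (s :: ss) (e :: es)
      = if e < s then pvPairLoop (s :: ss) es else (s, e) :: pvPairLoop ss (e :: es) := by
  rw [pvPairLoop]

-- every collected position is ≥ the base index
theorem pvScanSE_ge (cs : List Char) (i : Int) :
    (∀ x ∈ (pvScanSE cs i).1, i ≤ x) ∧ (∀ x ∈ (pvScanSE cs i).2, i ≤ x) := by
  induction cs generalizing i with
  | nil => simp [pvScanSE]
  | cons c cs ih =>
    have h := ih (i + 1)
    by_cases hM : c = 'M'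
    · refine ⟨?_, ?_⟩ <;> intro x hx <;> simp only [pvScanSE, hM] at hx
      · rcases List.mem_cons.mp hx with h1 | h1
        · omega
        · have := h.1 x h1; omega
      · have := h.2 x hx; omega
    · by_cases hS : c = '*'
      · refine ⟨?_, ?_⟩ <;> intro x hx <;>
          simp only [pvScanSE, hS] at hx
        · have := h.1 x hx; omega
        · rcases List.mem_cons.mp hx with h1 | h1
          · omega
          · have := h.2 x h1; omega
      · refine ⟨?_, ?_⟩ <;> intro x hx <;>
          simp only [pvScanSE, if_neg hM, if_neg hS] at hx
        · have := h.1 x hx; omega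
        · have := h.2 x hx; omega

-- head of B's next_star list = head? of A's star-position list
theorem pvNextStar_head (cs : List Char) (i : Int) :
    (match pvNextStar cs i with | [] => none | h :: _ => h) = (pvScanSE cs i).2.head? := by
  induction cs generalizing i with
  | nil => simp [pvNextStar, pvScanSE]
  | cons c cs ih =>
    by_cases hS : c = '*'
    · have hM : ¬ c = 'M' := by simp [hS]
      simp [pvNextStar, pvScanSE, hS]
    · by_cases hM : c = 'M'
      · simp [pvNextStar, pvScanSE, hM, ih]
      · simp [pvNextStar, pvScanSE, hS, hM, ih]

-- main lemma: the two-pointer merge of A's lists equals B's collect pass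
theorem pv_main (cs : List Char) (i : Int) :
    pvPairLoop (pvScanSE cs i).1 (pvScanSE cs i).2
      = pvCollect cs (pvNextStar cs i) i := by
  induction cs generalizing i with
  | nil => simp [pvScanSE, pvCollect, pvPairLoop]
  | cons c cs ih =>
    have hge := pvScanSE_ge cs (i + 1)
    have hhead := pvNextStar_head cs (i + 1)
    have h2 := ih (i + 1)
    by_cases hM : c = 'M'
    · subst hM
      cases hes : (pvScanSE cs (i + 1)).2 with
      | nil =>
        -- no star after i: B skips this M, A's merge hits an empty end list
        have hv : (match pvNextStar cs (i + 1) with | [] => none | h :: _ => h) = none := by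
          rw [hhead, hes]; rfl
        rw [hes, pvPairLoop_nil_right] at h2
        cases hns' : pvNextStar cs (i + 1) with
        | nil =>
          rw [hns'] at h2
          simp [pvScanSE, pvNextStar, pvCollect, hes, hns', pvPairLoop_nil_right, ← h2]
        | cons h t =>
          have hv' : h = none := by rw [hns'] at hv; simpa using hv
          rw [hns'] at h2
          subst hv'
          simp [pvScanSE, pvNextStar, pvCollect, hes, hns', pvPairLoop_nil_right, ← h2]
      | cons e es =>
        -- e = nearest star after i; e > i so A emits (i, e) immediately
        have he : i + 1 ≤ e := by apply hge.2; rw [hes]; simp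
        have hv : (match pvNextStar cs (i + 1) with | [] => none | h :: _ => h) = some e := by
          rw [hhead, hes]; rfl
        cases hns' : pvNextStar cs (i + 1) with
        | nil => rw [hns'] at hv; simp at hv
        | cons h t =>
          have hv' : h = some e := by rw [hns'] at hv; simpa using hv
          rw [hes, hns'] at h2
          subst hv'
          simp only [pvScanSE, pvNextStar, pvCollect, hes, hns']
          simp only [reduceIte, Char.reduceEq]
          rw [pvPairLoop_cons, if_neg (by omega : ¬ e < i)]
          simpa using h2
    · by_cases hS : c = '*'
      · -- a star at i: all later M positions exceed i, so A's merge skips this end once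
        subst hS
        cases hss : (pvScanSE cs (i + 1)).1 with
        | nil =>
          rw [hss, pvPairLoop_nil_left] at h2
          simp [pvScanSE, pvNextStar, pvCollect, hss, pvPairLoop_nil_left, ← h2]
        | cons s ss =>
          have hs : i + 1 ≤ s := by apply hge.1; rw [hss]; simp
          rw [hss] at h2
          simp only [pvScanSE, pvNextStar, pvCollect, hss]
          simp only [reduceIte, Char.reduceEq]
          rw [pvPairLoop_cons, if_pos (by omega : i < s)]
          simpa using h2
      · simp only [pvScanSE, pvNextStar, pvCollect, if_neg hM, if_neg hS]
        -- the non-M, non-* head contributes nothing on either side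
        cases hns' : pvNextStar cs (i + 1) with
        | nil =>
          rw [hns'] at h2
          simpa [pvCollect, hM] using h2
        | cons h t =>
          rw [hns'] at h2
          simpa [pvCollect, hM] using h2

-- ===== VERDICT (by name: the statement is the Claim_ definition above) =====
theorem find_start_ends_spec : Claim_equal_find_start_ends := by
  intro s _
  unfold Spec_find_start_ends find_start_ends find_start_ends_alt
  simp only
  split_ifs with h1 h2
  · -- empty string
    have : s.toList = [] := by
      cases hs : s.toList with
      | nil => rfl
      | cons c cs => rw [hs] at h1; simp at h1
    rw [this]; simp [pvCollect]
  · -- no starts or no ends: merge is vacuous, and so is B's collect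
    rw [← pv_main]
    rcases h2 with h | h
    · have : (pvScanSE s.toList 0).1 = [] := by
        cases hs : (pvScanSE s.toList 0).1 with
        | nil => rfl
        | cons a b => rw [hs] at h; simp at h
      rw [this, pvPairLoop_nil_left]
    · have : (pvScanSE s.toList 0).2 = [] := by
        cases hs : (pvScanSE s.toList 0).2 with
        | nil => rfl
        | cons a b => rw [hs] at h; simp at h
      rw [this, pvPairLoop_nil_right]
  · exact pv_main s.toList 0
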